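-- pv_equiv track=rewrite | github.com/maafy6/advent-of-code | aoc/aoc_2023/advent_2023_12.py | gen_nonograms
-- ===== SOURCE A (Python) =====
-- from collections.abc import Iterator
-- from itertools import groupby
--
-- def describe_nonogram(nono: str) -> tuple[int, ...]:
--     """Describe a nonogram according to its sequence of # characters.
--
--     :param nono: The nonogram string.
--     :returns: A list of consecutive sequences of #.
--     """
--     return tuple(sum(1 for _ in g) for c, g in groupby(nono) if c == "#")
--
-- def gen_nonograms(
--     record: str, desc: tuple[int, ...], prefix: str = ""
-- ) -> Iterator[str]:
--     """Generate nonograms matching the record and its description.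
--
--     :param record: The record, with wildcard values as ?.
--     :param desc: The description of sequences of # characters.
--     :param prefix: The solves prefix for this nonogram.
--     """
--     # If there are no more `#` runs remaining, the rest must all be `.` (or `?`
--     # that can be made into `.`).
--     if not desc:
--         if "#" in record:
--             return
--
--         yield prefix + record.replace("?", ".")
--         return
--
--     # If there are fewer possible `#` characters than the description requires,
--     # abort.
--     maybe_hashes = record.count("#") + record.count("?")
--     if maybe_hashes < sum(desc):
--         return
--
--     # If there are no more free `?` characters, we should just validate the
--     # remaining nonogram for validity.
--     if "?" not in record or maybe_hashes == sum(desc):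
--         record = record.replace("?", "#")
--         if describe_nonogram(record) == desc:
--             yield prefix + record
--         return
--
--     # If the record starts with `.`, we can consume it into the prefix and
--     # continue parsing.
--     while record[0] == ".":
--         record = record[1:]
--         prefix += "."
--
--     # If the record starts with `#`, then we should verify that the string can
--     # consume the entire next run of `#` from the description (plus a buffer
--     # `.` character if we are not at the end of the string.)
--     if record[0] == "#":
--         run = desc[0]
--
--         # There cannot be a `.` in the run of `#`.
--         if "." in record[:run]:
--             return
--
--         # Consume the next (run+1) characters, which should be all `#` then one
--         # `.` If we are at the end of the string, the trailing `.` may not be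
--         # needed.
--         consumed = "#" * run
--         if next_char := record[run : run + 1]:
--             if next_char == "#":
--                 return
--
--             consumed += "."
--
--         yield from gen_nonograms(record[len(consumed) :], desc[1:], prefix + consumed)
--
--     # If the record starts with a `?`, try it out as both a `.` and a `#`.
--     elif record[0] == "?":
--         yield from gen_nonograms(record[1:], desc, prefix + ".")
--         yield from gen_nonograms("#" + record[1:], desc, prefix)
--
--     # There shouldn't be any other characters in the record.
--     else:
--         raise ValueError("Invalid nonogram character.")
-- ===== SOURCE B (Python) =====
-- from collections.abc import Iterator
-- from itertools import groupby
--
--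
-- def describe_nonogram(nono: str) -> tuple[int, ...]:
--     """Describe a nonogram according to its sequence of # characters."""
--     return tuple(sum(1 for _ in g) for c, g in groupby(nono) if c == "#")
--
--
-- def gen_nonograms(
--     record: str, desc: tuple[int, ...], prefix: str = ""
-- ) -> Iterator[str]:
--     """Generate nonograms matching the record and its description by brute force:
--     build every completion of the '?' wildcards left to right ('.' tried before
--     '#', leftmost wildcard most significant), then keep those whose description
--     matches desc."""
--     fulls = [""]
--     for ch in record:
--         if ch == "?":
--             fulls = [f + c for f in fulls for c in ".#"]
--         else:
--             fulls = [f + ch for f in fulls]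
--     for full in fulls:
--         if describe_nonogram(full) == desc:
--             yield prefix + full
-- ===== Notes on version B (the rewrite author's own statement) =====
-- stated objective: simpler
-- what changed: A's desc-driven backtracking parser (prune by counts, consume runs, branch on '?') is replaced by plain generate-and-filter: enumerate every completion of the '?' wildcards ('.' before '#', leftmost most significant) and yield prefix+full whenever describe_nonogram(full) == desc.
-- outside the precondition, e.g. on gen_nonograms('?x?', (1,), ''): A returns ['.x#', '#..'], B returns ['.x#', '#x.']; on gen_nonograms('x??', (1,), ''): A raises ValueError, B returns ['x.#', 'x#.']; on gen_nonograms('#?', (-1, 1), ''): A returns ['#.'], B returns []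
import Mathlib
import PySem

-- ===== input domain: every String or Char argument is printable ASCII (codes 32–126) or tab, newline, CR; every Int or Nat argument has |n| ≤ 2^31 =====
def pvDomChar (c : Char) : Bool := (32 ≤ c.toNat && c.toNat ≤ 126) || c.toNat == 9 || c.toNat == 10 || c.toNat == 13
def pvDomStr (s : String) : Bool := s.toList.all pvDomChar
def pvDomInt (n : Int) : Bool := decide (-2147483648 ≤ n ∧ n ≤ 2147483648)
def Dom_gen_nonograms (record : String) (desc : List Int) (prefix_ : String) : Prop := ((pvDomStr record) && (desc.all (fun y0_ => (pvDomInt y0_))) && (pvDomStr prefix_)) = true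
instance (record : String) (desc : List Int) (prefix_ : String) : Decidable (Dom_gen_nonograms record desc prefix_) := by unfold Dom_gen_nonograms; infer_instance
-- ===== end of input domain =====

-- B replaces A's pruned desc-driven backtracking by plain generate-and-filter: enumerate every
-- '?'-completion of the record and keep those whose run description equals desc (objective: simpler; not faster).


-- ===== PORT A =====
-- hand port of itertools.groupby: run-length encoding of maximal runs of equal characters (exact)
def groupsRLE : List Char → List (Char × Nat)
  | [] => []
  | c :: s => (c, (s.takeWhile (· = c)).length + 1) :: groupsRLE (s.dropWhile (· = c))
termination_by l => l.length
decreasing_by simp only [List.length_cons]; exact Nat.lt_succ_of_le (List.length_dropWhile_le _ _)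

-- port of describe_nonogram (shared helper of both Pythons), on char lists
def descL (s : List Char) : List Int :=
  (groupsRLE s).filterMap (fun g => if g.1 = '#' then some ((g.2 : Int)) else none)

-- port of the `while record[0] == ".":` loop: strips leading dots into the prefix
def stripDots : List Char → List Char → List Char × List Char
  | '.' :: r, p => stripDots r (p ++ ['.'])
  | r, p => (r, p)

-- facts about the loop above, used by genA's termination argument
theorem stripDots_fst (r p : List Char) : (stripDots r p).1 = r.dropWhile (· = '.') := by
  induction r generalizing p with
  | nil => rfl
  | cons c t ih =>
    by_cases hc : c = '.'
    · subst hc; simpa [stripDots] using ih (p ++ ['.'])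
    · simp [stripDots, hc]

theorem dropWhile_self_or_lt (p : Char → Bool) (l : List Char) :
    l.dropWhile p = l ∨ (l.dropWhile p).length < l.length := by
  cases l with
  | nil => exact Or.inl rfl
  | cons c t =>
    by_cases hc : p c
    · right
      rw [List.dropWhile_cons_of_pos hc]
      exact Nat.lt_succ_of_le (List.length_dropWhile_le p t)
    · left; exact List.dropWhile_cons_of_neg (by simpa using hc)

-- core of A on char lists (prefix accumulated as a char list; wrapper below packs Strings)
def genA (record : List Char) (desc : List Int) (prefix_ : List Char) : List (List Char) :=
  match desc with
  | [] =>
    if '#' ∈ record then []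
    else [prefix_ ++ record.map (fun c => if c = '?' then '.' else c)]  -- record.replace("?", ".") (single-char replace = map)
  | run :: desc' =>
    let maybe_hashes : Int := (record.count '#' : Int) + (record.count '?' : Int)
    if maybe_hashes < (run :: desc').sum then []
    else if ¬ ('?' ∈ record) ∨ maybe_hashes = (run :: desc').sum then
      let record2 := record.map (fun c => if c = '?' then '#' else c)   -- record.replace("?", "#")
      if descL record2 = run :: desc' then [prefix_ ++ record2] else []
    else
      let record1 := (stripDots record prefix_).1
      let prefix1 := (stripDots record prefix_).2
      match hm : record1 with
      | [] => []     -- unreachable here ('?' ∈ record); Python's record[0] would raise IndexError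
      | c :: rest =>
        if hc : c = '#' then
          if '.' ∈ PySem.List.slice record1 none (some run) then []     -- "." in record[:run]
          else
            -- consumed = "#" * run ; toNat clamps negatives to 0 exactly as Python's str repetition
            let consumed := List.replicate run.toNat '#'
            let next_char := PySem.List.slice record1 (some run) (some (run + 1))   -- record[run:run+1]
            if next_char = ['#'] then []
            else
              let consumed2 := if next_char ≠ [] then consumed ++ ['.'] else consumed
              genA (record1.drop consumed2.length) desc' (prefix1 ++ consumed2)     -- record[len(consumed):]
        else if hq : c = '?' then
          genA rest (run :: desc') (prefix1 ++ ['.']) ++ genA ('#' :: rest) (run :: desc') prefix1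
        else []      -- Python raises ValueError("Invalid nonogram character.") — outside Pre_
termination_by (2 * record.length + (if record.head? = some '#' then 0 else 1), desc.length)
decreasing_by
  · -- '#' branch: the consumed characters shorten the record, or nothing is consumed and desc shrinks
    simp_wf
    simp only [stripDots_fst]
    have hm' : List.dropWhile (fun x => decide (x = '.')) record = c :: rest := by
      rw [← stripDots_fst record prefix_]; exact hm
    have hd1 : 1 ≤ (List.dropWhile (fun x => decide (x = '.')) record).length := by
      rw [hm']; simp
    have hlen : (List.dropWhile (fun x => decide (x = '.')) record).length ≤ record.length :=
      List.length_dropWhile_le _ _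
    by_cases hnc : PySem.List.slice (List.dropWhile (fun x => decide (x = '.')) record)
        (some run) (some (run + 1)) = []
    · simp only [hnc, if_true, List.length_replicate, ite_true]
      by_cases h0 : run.toNat = 0
      · rcases dropWhile_self_or_lt (· = '.') record with he | hl
        · rw [h0]
          simp only [List.drop_zero, Nat.sub_zero] at *
          rw [he, ← List.head?_eq_getElem?]
          exact Prod.Lex.right _ (Nat.lt_succ_self _)
        · apply Prod.Lex.left
          simp only [List.length_drop] at *
          split <;> split <;> omega
      · apply Prod.Lex.left
        simp only [List.length_drop] at *
        split <;> split <;> omega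
    · simp only [hnc, if_false, List.length_append, List.length_replicate, List.length_cons,
        List.length_nil, ite_false]
      apply Prod.Lex.left
      simp only [List.length_drop] at *
      split <;> split <;> omega
  · -- '?' branch, first call: one character moved to the prefix
    apply Prod.Lex.left
    have hsd := stripDots_fst record prefix_
    have hm' : (stripDots record prefix_).1 = c :: rest := hm
    have h1 : rest.length + 1 ≤ record.length := by
      have := List.length_dropWhile_le (· = '.') record
      rw [← hsd, hm'] at this
      simpa using this
    split <;> split <;> omega
  · -- '?' branch, second call: same length but the leading '?' became '#'
    have hsd := stripDots_fst record prefix_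
    have hm' : (stripDots record prefix_).1 = c :: rest := hm
    rcases dropWhile_self_or_lt (· = '.') record with he | hl
    · have hrec : record = c :: rest := by rw [← he, ← hsd, hm']
      apply Prod.Lex.left
      rw [hrec]
      simp [hq]
    · rw [← hsd, hm'] at hl
      apply Prod.Lex.left
      simp only [List.length_cons] at hl ⊢
      split <;> omega

def gen_nonograms (record : String) (desc : List Int) (prefix_ : String) : List String :=
  (genA record.toList desc prefix_.toList).map (fun l => String.ofList l)

-- ===== PORT B =====
-- port of B's completion builder: every way to replace each '?' by '.' or '#',
-- built left to right, '.' tried before '#' (strings represented as char lists)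
def pyFulls (record : List Char) : List (List Char) :=
  record.foldl (fun fulls ch =>
    if ch = '?' then fulls.flatMap (fun f => (['.', '#'].map (fun c => f ++ [c])))
    else fulls.map (fun f => f ++ [ch])) [[]]

def gen_nonograms_alt (record : String) (desc : List Int) (prefix_ : String) : List String :=
  ((pyFulls record.toList).filterMap
    (fun full => if descL full = desc then some (prefix_.toList ++ full) else none)).map
    (fun l => String.ofList l)

-- ===== PRECONDITION & SPEC =====
-- Pre_ admits every input except those that reach A's recursive backtracking region (a free '?' and
-- slack counts, desc nonempty) with a record outside the nonogram alphabet {'.', '#', '?'} or with a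
-- nonpositive desc entry: there A raises ValueError/IndexError or, consuming a foreign character or a
-- negative run as if it were part of a '#'-run, returns strings that do not match the requested
-- description.  All other inputs (empty desc, fewer possible '#' than desc needs, no free '?', or
-- counts exactly tight, plus everything over the proper alphabet with positive runs) are admitted.
def Pre_gen_nonograms (record : String) (desc : List Int) (prefix_ : String) : Prop :=
  (record.toList.all (fun c => c == '.' || c == '#' || c == '?') = true ∧ (∀ n ∈ desc, 1 ≤ n)) ∨
    desc = [] ∨
    ((record.toList.count '#' : Int) + (record.toList.count '?' : Int)) < desc.sum ∨
    record.toList.contains '?' = false ∨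
    ((record.toList.count '#' : Int) + (record.toList.count '?' : Int)) = desc.sum
instance (record : String) (desc : List Int) (prefix_ : String) : Decidable (Pre_gen_nonograms record desc prefix_) := by unfold Pre_gen_nonograms; infer_instance

def pvWitness_gen_nonograms : String × List Int × String := ("?#?.??", [2, 1], "")

def Spec_gen_nonograms (record : String) (desc : List Int) (prefix_ : String) (out : List String) : Prop := out = gen_nonograms_alt record desc prefix_
instance (record : String) (desc : List Int) (prefix_ : String) (out : List String) : Decidable (Spec_gen_nonograms record desc prefix_ out) := by unfold Spec_gen_nonograms; infer_instance

-- ===== CLAIM (what is proved, stated in full; the proofs are below) =====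
def Claim_equal_gen_nonograms : Prop := ∀ (record : String) (desc : List Int) (prefix_ : String), Dom_gen_nonograms record desc prefix_ → Pre_gen_nonograms record desc prefix_ → Spec_gen_nonograms record desc prefix_ (gen_nonograms record desc prefix_)

-- ===== LEMMAS AND PROOFS =====

-- B's enumeration, recast as a structural recursion (proof-side only)
def completions : List Char → List (List Char)
  | [] => [[]]
  | c :: cs =>
    if c = '?' then
      (completions cs).map (fun t => '.' :: t) ++ (completions cs).map (fun t => '#' :: t)
    else (completions cs).map (fun t => c :: t)

theorem pyFulls_foldl (r : List Char) : ∀ acc : List (List Char),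
    r.foldl (fun fulls ch =>
      if ch = '?' then fulls.flatMap (fun f => (['.', '#'].map (fun c => f ++ [c])))
      else fulls.map (fun f => f ++ [ch])) acc
    = acc.flatMap (fun f => (completions r).map (fun u => f ++ u)) := by
  induction r with
  | nil =>
    intro acc
    simp [completions]
  | cons c t ih =>
    intro acc
    rw [List.foldl_cons, ih]
    by_cases hc : c = '?'
    · subst hc
      simp only [completions, ite_true, List.map_cons, List.map_nil, List.flatMap_assoc]
      congr 1
      funext f
      simp only [List.flatMap_cons, List.flatMap_nil, List.map_append, List.map_map,
        List.append_nil]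
      congr 1 <;>
        · apply List.map_congr_left
          intro u _
          simp [← List.append_cons]
    · simp only [completions, hc, ite_false, List.flatMap_map]
      congr 1
      funext f
      simp only [Function.comp, List.map_map]
      apply List.map_congr_left
      intro u _
      simp [← List.append_cons]

theorem pyFulls_eq (r : List Char) : pyFulls r = completions r := by
  rw [pyFulls, pyFulls_foldl]
  simp

-- B's filtered enumeration, on char lists (proof-side abbreviation)
def specF (r : List Char) (d : List Int) (p : List Char) : List (List Char) :=
  (completions r).filterMap (fun s => if descL s = d then some (p ++ s) else none)

-- ---------- describe_nonogram (descL) facts ----------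

theorem groupsRLE_cons (c : Char) (s : List Char) :
    groupsRLE (c :: s) = (c, (s.takeWhile (· = c)).length + 1) :: groupsRLE (s.dropWhile (· = c)) := by
  rw [groupsRLE]

theorem descL_cons_ne {c : Char} (hc : c ≠ '#') (s : List Char) :
    descL (c :: s) = descL (s.dropWhile (· = c)) := by
  rw [descL, groupsRLE_cons]
  simp [descL, hc]

theorem descL_hash_cons (s : List Char) :
    descL ('#' :: s) = (((s.takeWhile (· = '#')).length + 1 : Nat) : Int) :: descL (s.dropWhile (· = '#')) := by
  rw [descL, groupsRLE_cons]
  simp [descL]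

theorem descL_dropWhile_ne {c : Char} (hc : c ≠ '#') (s : List Char) :
    descL (s.dropWhile (· = c)) = descL s := by
  cases s with
  | nil => rfl
  | cons d t =>
    by_cases hd : d = c
    · subst hd
      rw [List.dropWhile_cons_of_pos (by simp), descL_cons_ne hc]
    · rw [List.dropWhile_cons_of_neg (by simpa using hd)]

theorem descL_cons_ne' {c : Char} (hc : c ≠ '#') (s : List Char) :
    descL (c :: s) = descL s := by
  rw [descL_cons_ne hc, descL_dropWhile_ne hc]

theorem descL_sum (s : List Char) : (descL s).sum = (s.count '#' : Int) := by
  induction hn : s.length using Nat.strong_induction_on generalizing s with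
  | _ n ih =>
  cases s with
  | nil => simp [descL, groupsRLE]
  | cons c t =>
    have hsplit : t.takeWhile (· = c) ++ t.dropWhile (· = c) = t := List.takeWhile_append_dropWhile
    have hlt : (t.dropWhile (· = c)).length < n := by
      subst hn
      exact Nat.lt_succ_of_le (List.length_dropWhile_le _ _)
    by_cases hc : c = '#'
    · subst hc
      rw [descL_hash_cons, List.sum_cons, ih _ hlt _ rfl]
      have hcount : t.count '#' = (t.takeWhile (· = '#')).length + (t.dropWhile (· = '#')).count '#' := by
        conv_lhs => rw [← hsplit]
        rw [List.count_append]
        congr 1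
        apply List.count_eq_length.mpr
        intro a ha
        exact (by simpa using List.mem_takeWhile_imp ha : a = '#').symm
      rw [List.count_cons_self, hcount]
      push_cast
      ring
    · rw [descL_cons_ne hc, ih _ hlt _ rfl]
      have h1 : (c :: t).count '#' = t.count '#' := by
        rw [List.count_cons]
        simp [hc]
      have h2 : (t.takeWhile (· = c)).count '#' = 0 := by
        rw [List.count_eq_zero]
        intro h
        exact hc (by simpa using List.mem_takeWhile_imp h : ('#' : Char) = c).symm
      have h3 : t.count '#' = (t.dropWhile (· = c)).count '#' := by
        conv_lhs => rw [← hsplit]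
        rw [List.count_append]
        omega
      rw [h1, h3]

theorem descL_pos (s : List Char) : ∀ n ∈ descL s, 1 ≤ n := by
  induction hn : s.length using Nat.strong_induction_on generalizing s with
  | _ n ih =>
  cases s with
  | nil => simp [descL, groupsRLE]
  | cons c t =>
    have hlt : (t.dropWhile (· = c)).length < n := by
      subst hn
      exact Nat.lt_succ_of_le (List.length_dropWhile_le _ _)
    by_cases hc : c = '#'
    · subst hc
      rw [descL_hash_cons]
      intro m hm
      rcases List.mem_cons.mp hm with h | h
      · subst h; omega
      · exact ih _ hlt _ rfl m h
    · rw [descL_cons_ne hc]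
      exact ih _ hlt _ rfl

theorem pos_sum_nonneg {d : List Int} (hd : ∀ n ∈ d, 1 ≤ n) : 0 ≤ d.sum := by
  induction d with
  | nil => simp
  | cons a t ih =>
    have := hd a (by simp)
    have := ih (fun n hn => hd n (List.mem_cons_of_mem _ hn))
    simp only [List.sum_cons]
    omega

theorem pos_sum_zero {d : List Int} (hd : ∀ n ∈ d, 1 ≤ n) (h : d.sum = 0) : d = [] := by
  cases d with
  | nil => rfl
  | cons a t =>
    have h1 := hd a (by simp)
    have h2 := pos_sum_nonneg (fun n hn => hd n (List.mem_cons_of_mem _ hn))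
    simp only [List.sum_cons] at h
    omega

theorem descL_eq_nil_iff (s : List Char) : descL s = [] ↔ '#' ∉ s := by
  constructor
  · intro h hmem
    have := descL_sum s
    rw [h] at this
    have : s.count '#' = 0 := by simpa using this.symm
    rw [List.count_eq_zero] at this
    exact this hmem
  · intro h
    apply pos_sum_zero (descL_pos s)
    rw [descL_sum, List.count_eq_zero.mpr h]
    rfl

-- ---------- completions facts ----------

theorem mem_completions_length {s r : List Char} (h : s ∈ completions r) : s.length = r.length := by
  induction r generalizing s with
  | nil => simp [completions] at h; simp [h]
  | cons c t ih =>
    by_cases hc : c = '?' <;> simp only [completions, hc, if_true, if_false, List.mem_append,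
        List.mem_map, ite_true, ite_false] at h
    · rcases h with ⟨u, hu, rfl⟩ | ⟨u, hu, rfl⟩ <;> simp [ih hu]
    · rcases h with ⟨u, hu, rfl⟩; simp [ih hu]

theorem mem_completions_getElem? {s r : List Char} (h : s ∈ completions r) :
    ∀ (i : Nat) (c : Char), r[i]? = some c → c ≠ '?' → s[i]? = some c := by
  induction r generalizing s with
  | nil => intro i c hi; simp at hi
  | cons d t ih =>
    intro i c hi hc
    by_cases hd : d = '?' <;> simp only [completions, hd, if_true, if_false, List.mem_append,
        List.mem_map, ite_true, ite_false] at h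
    · rcases h with ⟨u, hu, rfl⟩ | ⟨u, hu, rfl⟩ <;>
      · cases i with
        | zero => simp at hi; subst hd; exact absurd hi.symm hc
        | succ j => simp at hi ⊢; exact ih hu j c (by simpa using hi) hc
    · rcases h with ⟨u, hu, rfl⟩
      cases i with
      | zero => simpa using hi
      | succ j => simp at hi ⊢; exact ih hu j c (by simpa using hi) hc

theorem mem_completions_alpha {s r : List Char} (h : s ∈ completions r)
    (hr : ∀ c ∈ r, c = '.' ∨ c = '#' ∨ c = '?') : ∀ c ∈ s, c = '.' ∨ c = '#' := by
  induction r generalizing s with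
  | nil => simp [completions] at h; simp [h]
  | cons d t ih =>
    have hrt : ∀ c ∈ t, c = '.' ∨ c = '#' ∨ c = '?' := fun c hc => hr c (List.mem_cons_of_mem _ hc)
    by_cases hd : d = '?' <;> simp only [completions, hd, if_true, if_false, List.mem_append,
        List.mem_map, ite_true, ite_false] at h
    · rcases h with ⟨u, hu, rfl⟩ | ⟨u, hu, rfl⟩ <;> intro e he <;> rcases List.mem_cons.mp he with rfl | hmem
      · exact Or.inl rfl
      · exact ih hu hrt e hmem
      · exact Or.inr rfl
      · exact ih hu hrt e hmem
    · rcases h with ⟨u, hu, rfl⟩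
      intro e he
      rcases List.mem_cons.mp he with rfl | hmem
      · rcases hr e (List.mem_cons_self) with h | h | h
        · exact Or.inl h
        · exact Or.inr h
        · exact absurd h hd
      · exact ih hu hrt e hmem

theorem mem_completions_count {s r : List Char} (h : s ∈ completions r) :
    s.count '#' ≤ r.count '#' + r.count '?' := by
  induction r generalizing s with
  | nil => simp [completions] at h; simp [h]
  | cons d t ih =>
    by_cases hd : d = '?' <;> simp only [completions, hd, if_true, if_false, List.mem_append,
        List.mem_map, ite_true, ite_false] at h
    · subst hd
      rcases h with ⟨u, hu, rfl⟩ | ⟨u, hu, rfl⟩ <;>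
        have := ih hu <;>
        simp [List.count_cons] <;> omega
    · rcases h with ⟨u, hu, rfl⟩
      have := ih hu
      simp [List.count_cons, hd]
      by_cases h8 : d = '#' <;> simp [h8] <;> omega

theorem completions_no_q {r : List Char} (h : '?' ∉ r) : completions r = [r] := by
  induction r with
  | nil => rfl
  | cons c t ih =>
    have hc : c ≠ '?' := fun hc => h (by simp [hc])
    rw [completions]
    simp only [hc, if_false, ite_false]
    rw [ih (fun hm => h (by simp [hm]))]
    rfl

theorem qh_mem (r : List Char) : r.map (fun c => if c = '?' then '#' else c) ∈ completions r := by
  induction r with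
  | nil => simp [completions]
  | cons c t ih =>
    by_cases hc : c = '?' <;> simp only [completions, hc, if_true, if_false, List.map_cons,
        List.mem_append, List.mem_map, ite_true, ite_false]
    · right; exact ⟨_, ih, rfl⟩
    · exact ⟨_, ih, rfl⟩

theorem qd_mem (r : List Char) : r.map (fun c => if c = '?' then '.' else c) ∈ completions r := by
  induction r with
  | nil => simp [completions]
  | cons c t ih =>
    by_cases hc : c = '?' <;> simp only [completions, hc, if_true, if_false, List.map_cons,
        List.mem_append, List.mem_map, ite_true, ite_false]
    · left; exact ⟨_, ih, rfl⟩
    · exact ⟨_, ih, rfl⟩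

theorem mem_completions_count_eq {s r : List Char} (h : s ∈ completions r)
    (hcnt : s.count '#' = r.count '#' + r.count '?') :
    s = r.map (fun c => if c = '?' then '#' else c) := by
  induction r generalizing s with
  | nil => simp [completions] at h; simp [h]
  | cons d t ih =>
    by_cases hd : d = '?' <;> simp only [completions, hd, if_true, if_false, List.mem_append,
        List.mem_map, ite_true, ite_false] at h
    · subst hd
      rcases h with ⟨u, hu, rfl⟩ | ⟨u, hu, rfl⟩
      · exfalso
        have := mem_completions_count hu
        simp [List.count_cons] at hcnt
        omega
      · have : u.count '#' = t.count '#' + t.count '?' := by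
          simp [List.count_cons] at hcnt
          omega
        simp [ih hu this]
    · rcases h with ⟨u, hu, rfl⟩
      have : u.count '#' = t.count '#' + t.count '?' := by
        simp [List.count_cons, hd] at hcnt
        by_cases h8 : d = '#' <;> simp [h8] at hcnt <;> omega
      simp [ih hu this, hd]

theorem completions_nodup (r : List Char) : (completions r).Nodup := by
  induction r with
  | nil => simp [completions]
  | cons c t ih =>
    by_cases hc : c = '?' <;> simp only [completions, hc, if_true, if_false, ite_true, ite_false]
    · apply List.Nodup.append
      · exact ih.map (fun a b h => by simpa using h)
      · exact ih.map (fun a b h => by simpa using h)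
      · intro x hx hy
        simp only [List.mem_map] at hx hy
        rcases hx with ⟨u, _, rfl⟩
        rcases hy with ⟨v, _, hv⟩
        simp at hv
    · exact ih.map (fun a b h => by simpa using h)

-- ---------- filterMap tools ----------

theorem filterMap_eq_nil {α β : Type} (l : List α) (f : α → Option β)
    (h : ∀ a ∈ l, f a = none) : l.filterMap f = [] := by
  induction l with
  | nil => rfl
  | cons a t ih =>
    rw [List.filterMap_cons, h a (by simp)]
    exact ih (fun b hb => h b (by simp [hb]))

theorem filterMap_single {α β : Type} [DecidableEq α] (l : List α) (f : α → Option β) (a : α)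
    (hnd : l.Nodup) (hmem : a ∈ l) (h : ∀ s ∈ l, f s ≠ none → s = a) :
    l.filterMap f = (f a).toList := by
  induction l with
  | nil => simp at hmem
  | cons b t ih =>
    rcases List.mem_cons.mp hmem with rfl | hmem'
    · rw [List.filterMap_cons]
      have ht : t.filterMap f = [] := by
        apply filterMap_eq_nil
        intro x hx
        by_contra hne
        have := h x (by simp [hx]) hne
        subst this
        exact (List.nodup_cons.mp hnd).1 hx
      cases hfa : f a <;> simp [ht, hfa]
    · have hb : f b = none := by
        by_contra hne
        have := h b (by simp) hne
        subst this
        exact (List.nodup_cons.mp hnd).1 hmem'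
      rw [List.filterMap_cons, hb]
      exact ih (List.nodup_cons.mp hnd).2 hmem' (fun s hs => h s (by simp [hs]))

theorem filterMap_congr_mem {α β : Type} {l : List α} {f g : α → Option β}
    (h : ∀ a ∈ l, f a = g a) : l.filterMap f = l.filterMap g := by
  induction l with
  | nil => rfl
  | cons a t ih =>
    rw [List.filterMap_cons, List.filterMap_cons, h a (by simp),
      ih (fun b hb => h b (by simp [hb]))]

-- ---------- strip / step lemmas for B's enumeration ----------

theorem stripDots_snd (r p : List Char) : (stripDots r p).2 = p ++ r.takeWhile (· = '.') := by
  induction r generalizing p with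
  | nil => simp [stripDots]
  | cons c t ih =>
    by_cases hc : c = '.'
    · subst hc
      rw [List.takeWhile_cons_of_pos (by simp)]
      show (stripDots t (p ++ ['.'])).2 = _
      rw [ih]
      simp
    · rw [List.takeWhile_cons_of_neg (by simpa using hc)]
      simp [stripDots, hc]

theorem specF_dot (t : List Char) (d : List Int) (p : List Char) :
    specF ('.' :: t) d p = specF t d (p ++ ['.']) := by
  unfold specF
  rw [show completions ('.' :: t) = (completions t).map (fun s => '.' :: s) by simp [completions]]
  rw [List.filterMap_map]
  apply filterMap_congr_mem
  intro s _
  simp only [Function.comp_apply, descL_cons_ne' (by decide : ('.' : Char) ≠ '#')]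
  split <;> simp

theorem specF_qmark (t : List Char) (d : List Int) (p : List Char) :
    specF ('?' :: t) d p = specF t d (p ++ ['.']) ++ specF ('#' :: t) d p := by
  have h1 : ((completions t).map (fun s => '.' :: s)).filterMap
      (fun s => if descL s = d then some (p ++ s) else none) = specF t d (p ++ ['.']) := by
    rw [List.filterMap_map, specF]
    apply filterMap_congr_mem
    intro s _
    simp only [Function.comp_apply, descL_cons_ne' (by decide : ('.' : Char) ≠ '#')]
    split <;> simp
  have h2 : ((completions t).map (fun s => '#' :: s)).filterMap
      (fun s => if descL s = d then some (p ++ s) else none) = specF ('#' :: t) d p := by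
    rw [specF, show completions ('#' :: t) = (completions t).map (fun s => '#' :: s) by
      simp [completions]]
  rw [specF, show completions ('?' :: t) =
    (completions t).map (fun s => '.' :: s) ++ (completions t).map (fun s => '#' :: s) by
      simp [completions], List.filterMap_append, h1, h2]

theorem specF_dots (ds : List Char) (hds : ∀ c ∈ ds, c = '.') :
    ∀ (t : List Char) (d : List Int) (p : List Char),
    specF (ds ++ t) d p = specF t d (p ++ ds) := by
  induction ds with
  | nil => intro t d p; simp
  | cons c ds' ih =>
    intro t d p
    have hc : c = '.' := hds c List.mem_cons_self
    subst hc
    rw [List.cons_append, specF_dot,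
      ih (fun c hc => hds c (List.mem_cons_of_mem _ hc))]
    simp

-- ---------- run-matching lemmas ----------

theorem dropWhile_head?_not (p : Char → Bool) (l : List Char) :
    ∀ c, (l.dropWhile p).head? = some c → p c = false := by
  induction l with
  | nil => intro c h; simp at h
  | cons a t ih =>
    intro c h
    by_cases ha : p a
    · rw [List.dropWhile_cons_of_pos ha] at h
      exact ih c h
    · rw [List.dropWhile_cons_of_neg ha] at h
      simp at h
      subst h
      simpa using ha

theorem takeWhile_hashrun (n : Nat) (t : List Char) :
    (List.replicate n '#' ++ '.' :: t).takeWhile (· = '#') = List.replicate n '#' ∧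
    (List.replicate n '#' ++ '.' :: t).dropWhile (· = '#') = '.' :: t := by
  induction n with
  | zero =>
    constructor
    · rw [List.replicate_zero, List.nil_append, List.takeWhile_cons_of_neg (by decide)]
    · rw [List.replicate_zero, List.nil_append, List.dropWhile_cons_of_neg (by decide)]
  | succ m ih =>
    rw [List.replicate_succ, List.cons_append]
    constructor
    · rw [List.takeWhile_cons_of_pos (by decide), ih.1]
    · rw [List.dropWhile_cons_of_pos (by decide), ih.2]

theorem descL_hashrun (n : Nat) (hn : 1 ≤ n) (t : List Char) :
    descL (List.replicate n '#' ++ '.' :: t) = ((n : Nat) : Int) :: descL t := by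
  obtain ⟨m, rfl⟩ : ∃ m, n = m + 1 := ⟨n - 1, by omega⟩
  rw [List.replicate_succ, List.cons_append, descL_hash_cons,
    (takeWhile_hashrun m t).1, (takeWhile_hashrun m t).2,
    descL_cons_ne' (by decide : ('.' : Char) ≠ '#')]
  simp

theorem descL_run_facts (u : List Char) (m : Nat) (ds : List Int)
    (h : descL ('#' :: u) = ((m : Nat) : Int) :: ds) :
    ('#' :: u).take m = List.replicate m '#' ∧ ('#' :: u)[m]? ≠ some '#' ∧
      ds = descL (u.dropWhile (· = '#')) := by
  rw [descL_hash_cons] at h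
  have hm : (u.takeWhile (· = '#')).length + 1 = m := by
    have := (List.cons_eq_cons.mp h).1
    exact_mod_cast this
  have hds : ds = descL (u.dropWhile (· = '#')) := ((List.cons_eq_cons.mp h).2).symm
  have hw : u.takeWhile (· = '#') = List.replicate (u.takeWhile (· = '#')).length '#' := by
    apply List.eq_replicate_of_mem
    intro b hb
    simpa using List.mem_takeWhile_imp hb
  have hsplit : u.takeWhile (· = '#') ++ u.dropWhile (· = '#') = u := List.takeWhile_append_dropWhile
  set w := u.takeWhile (· = '#') with hwdef
  set r := u.dropWhile (· = '#') with hrdef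
  refine ⟨?_, ?_, hds⟩
  · rw [← hm, List.take_succ_cons, List.replicate_succ]
    congr 1
    conv_lhs => rw [← hsplit]
    rw [List.take_left]
    exact hw
  · rw [← hm, List.getElem?_cons_succ]
    conv_lhs => rw [← hsplit]
    rw [List.getElem?_append_right (Nat.le_refl _), Nat.sub_self, ← List.head?_eq_getElem?]
    intro hcontra
    have := dropWhile_head?_not (· = '#') u '#' (by rw [← hrdef]; exact hcontra)
    simp at this

-- take/getElem helpers
theorem mem_take_getElem? {l : List Char} {n : Nat} {a : Char} (h : a ∈ l.take n) :
    ∃ j, j < n ∧ l[j]? = some a := by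
  rcases List.mem_iff_getElem.mp h with ⟨j, hj, hval⟩
  have hj' : j < n ∧ j < l.length := by
    have := hj
    simp [List.length_take] at this
    omega
  refine ⟨j, hj'.1, ?_⟩
  rw [List.getElem?_eq_getElem hj'.2]
  rw [← hval, List.getElem_take]

theorem drop_take_one (r : List Char) (n : Nat) :
    (r.drop n).take 1 = (r[n]?).toList := by
  by_cases hn : n < r.length
  · rw [List.drop_eq_getElem_cons hn, List.getElem?_eq_getElem hn]
    rfl
  · rw [List.drop_eq_nil_of_le (by omega), List.getElem?_eq_none (by omega)]
    rfl

-- counting helpers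
theorem count_dropWhile_dot (r : List Char) (c : Char) (hc : c ≠ '.') :
    (r.dropWhile (· = '.')).count c = r.count c := by
  have hsplit : r.takeWhile (· = '.') ++ r.dropWhile (· = '.') = r := List.takeWhile_append_dropWhile
  have h0 : (r.takeWhile (· = '.')).count c = 0 := by
    rw [List.count_eq_zero]
    intro h
    exact hc (by simpa using List.mem_takeWhile_imp h)
  conv_rhs => rw [← hsplit]
  rw [List.count_append]
  omega

theorem count_hash_q_eq_length (l : List Char) (h : ∀ c ∈ l, c = '#' ∨ c = '?') :
    l.count '#' + l.count '?' = l.length := by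
  induction l with
  | nil => simp
  | cons c t ih =>
    have ht := ih (fun d hd => h d (List.mem_cons_of_mem _ hd))
    rcases h c List.mem_cons_self with rfl | rfl <;> simp [List.count_cons] <;> omega

-- ---------- the split lemma ----------

theorem consHalf (h q : Char) (pat' : List Char) (Q : List Char → Prop) [DecidablePred Q]
    (l : List (List Char)) (pfx : List Char) :
    (l.map (fun s => h :: s)).filterMap
      (fun s => if s.take (q :: pat').length = q :: pat' ∧ Q (s.drop (q :: pat').length)
                then some (pfx ++ s) else none)
    = if h = q then
        l.filterMap (fun s => if s.take pat'.length = pat' ∧ Q (s.drop pat'.length)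
                              then some ((pfx ++ [h]) ++ s) else none)
      else [] := by
  rw [List.filterMap_map]
  by_cases hq : h = q
  · subst hq
    rw [if_pos rfl]
    apply filterMap_congr_mem
    intro s _
    have hcond : ((h :: s).take (h :: pat').length = h :: pat' ∧ Q ((h :: s).drop (h :: pat').length))
        ↔ (s.take pat'.length = pat' ∧ Q (s.drop pat'.length)) := by
      simp [List.take_succ_cons, List.drop_succ_cons, List.cons_eq_cons]
    by_cases h1 : s.take pat'.length = pat' ∧ Q (s.drop pat'.length)
    · rw [Function.comp_apply, if_pos (hcond.mpr h1), if_pos h1]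
      simp
    · rw [Function.comp_apply, if_neg (fun hx => h1 (hcond.mp hx)), if_neg h1]
  · rw [if_neg hq]
    apply filterMap_eq_nil
    intro s _
    have : ¬ ((h :: s).take (q :: pat').length = q :: pat' ∧ Q ((h :: s).drop (q :: pat').length)) := by
      simp only [List.length_cons, List.take_succ_cons, List.cons_eq_cons]
      tauto
    rw [Function.comp_apply, if_neg this]

theorem completions_split (pat : List Char) (Q : List Char → Prop) [DecidablePred Q] :
    ∀ (t pfx : List Char),
    pat.length ≤ t.length →
    (∀ (i : Nat) (c cp : Char), t[i]? = some c → pat[i]? = some cp → c ≠ '?' → c = cp) →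
    (∀ c ∈ pat, c = '.' ∨ c = '#') →
    (completions t).filterMap
      (fun s => if s.take pat.length = pat ∧ Q (s.drop pat.length) then some (pfx ++ s) else none)
    = (completions (t.drop pat.length)).filterMap
        (fun u => if Q u then some ((pfx ++ pat) ++ u) else none) := by
  induction pat with
  | nil =>
    intro t pfx _ _ _
    apply filterMap_congr_mem
    intro s _
    simp
  | cons q pat' ih =>
    intro t pfx hlen hcompat hpat
    cases t with
    | nil => simp at hlen
    | cons c t' =>
      have hq' : q = '.' ∨ q = '#' := hpat q List.mem_cons_self
      have hlen' : pat'.length ≤ t'.length := by simpa using hlen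
      have hcompat' : ∀ (i : Nat) (c' cp : Char), t'[i]? = some c' → pat'[i]? = some cp →
          c' ≠ '?' → c' = cp := by
        intro i c' cp hi hp hne
        exact hcompat (i + 1) c' cp (by simpa using hi) (by simpa using hp) hne
      have hpat' : ∀ c' ∈ pat', c' = '.' ∨ c' = '#' := fun c' hc' => hpat c' (List.mem_cons_of_mem _ hc')
      have hfin : ∀ (w : List Char),
          (completions (t'.drop pat'.length)).filterMap
            (fun u => if Q u then some (((pfx ++ [w.headD ' ']) ++ pat') ++ u) else none)
          = (completions (t'.drop pat'.length)).filterMap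
            (fun u => if Q u then some ((pfx ++ w.headD ' ' :: pat') ++ u) else none) := by
        intro w
        apply filterMap_congr_mem
        intro u _
        split <;> simp
      by_cases hc : c = '?'
      · subst hc
        rw [show completions ('?' :: t') =
          (completions t').map (fun s => '.' :: s) ++ (completions t').map (fun s => '#' :: s) by
            simp [completions]]
        rw [List.filterMap_append, consHalf, consHalf]
        rcases hq' with rfl | rfl
        · rw [if_pos rfl, if_neg (by decide), List.append_nil, ih t' (pfx ++ ['.']) hlen' hcompat' hpat']
          have := hfin ['.']
          simp only [List.headD_cons] at this
          rw [this]
          rfl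
        · rw [if_neg (by decide), if_pos rfl, List.nil_append, ih t' (pfx ++ ['#']) hlen' hcompat' hpat']
          have := hfin ['#']
          simp only [List.headD_cons] at this
          rw [this]
          rfl
      · have hcq : c = q := hcompat 0 c q (by simp) (by simp) hc
        rw [show completions (c :: t') = (completions t').map (fun s => c :: s) by
          simp [completions, hc]]
        rw [consHalf, hcq, if_pos rfl, ih t' (pfx ++ [q]) hlen' hcompat' hpat']
        have := hfin [q]
        simp only [List.headD_cons] at this
        rw [this]
        rfl

-- ---------- remaining helpers for the main proof ----------

theorem map_qh_no_q {r : List Char} (h : '?' ∉ r) :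
    r.map (fun c => if c = '?' then '#' else c) = r := by
  induction r with
  | nil => rfl
  | cons c t ih =>
    have hc : c ≠ '?' := fun hc => h (by simp [hc])
    rw [List.map_cons, if_neg hc, ih (fun hm => h (List.mem_cons_of_mem _ hm))]

theorem mem_completions_no_hash {s r : List Char} (h : s ∈ completions r) (hr : '#' ∉ r)
    (hs : '#' ∉ s) : s = r.map (fun c => if c = '?' then '.' else c) := by
  induction r generalizing s with
  | nil => simp [completions] at h; simp [h]
  | cons d t ih =>
    have hrt : '#' ∉ t := fun hm => hr (List.mem_cons_of_mem _ hm)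
    by_cases hd : d = '?' <;> simp only [completions, hd, if_true, if_false, List.mem_append,
        List.mem_map, ite_true, ite_false] at h
    · subst hd
      rcases h with ⟨u, hu, rfl⟩ | ⟨u, hu, rfl⟩
      · have hsu : '#' ∉ u := fun hm => hs (List.mem_cons_of_mem _ hm)
        simp [ih hu hrt hsu]
      · exact absurd List.mem_cons_self hs
    · rcases h with ⟨u, hu, rfl⟩
      have hsu : '#' ∉ u := fun hm => hs (List.mem_cons_of_mem _ hm)
      have hdh : d ≠ '#' := fun hdh => hr (by simp [hdh])
      simp [ih hu hrt hsu, hd]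

theorem qd_no_hash {r : List Char} (h : '#' ∉ r) :
    '#' ∉ r.map (fun c => if c = '?' then '.' else c) := by
  intro hm
  rcases List.mem_map.mp hm with ⟨c, hc, hceq⟩
  by_cases hq : c = '?' <;> simp [hq] at hceq
  exact h (hceq ▸ hc)

theorem specF_strip (r : List Char) (d : List Int) (p : List Char) :
    specF r d p = specF ((stripDots r p).1) d ((stripDots r p).2) := by
  rw [stripDots_fst, stripDots_snd]
  conv_lhs => rw [show r = r.takeWhile (· = '.') ++ r.dropWhile (· = '.') from
    List.takeWhile_append_dropWhile.symm]
  exact specF_dots _ (fun c hc => by simpa using List.mem_takeWhile_imp hc) _ d p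

theorem descL_take_decomp {s : List Char} {n : Nat} (hn : 1 ≤ n)
    (htk : s.take (n + 1) = List.replicate n '#' ++ ['.']) :
    descL s = ((n : Nat) : Int) :: descL (s.drop (n + 1)) := by
  conv_lhs => rw [← List.take_append_drop (n + 1) s, htk]
  rw [List.append_assoc, List.singleton_append]
  exact descL_hashrun n hn _

theorem descL_match_iff (s : List Char) (n : Nat) (hn : 1 ≤ n) (hlen : n < s.length)
    (hs0 : s[0]? = some '#') (halpha : ∀ c ∈ s, c = '.' ∨ c = '#') (ds : List Int) :
    descL s = ((n : Nat) : Int) :: ds ↔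
      s.take (n + 1) = List.replicate n '#' ++ ['.'] ∧ descL (s.drop (n + 1)) = ds := by
  constructor
  · intro h
    cases s with
    | nil => simp at hs0
    | cons c u =>
      have hc : c = '#' := by simpa using hs0
      subst hc
      obtain ⟨htake, hget, hds⟩ := descL_run_facts u n ds h
      obtain ⟨x, hxeq⟩ : ∃ x, ('#' :: u)[n]? = some x :=
        ⟨_, List.getElem?_eq_getElem hlen⟩
      have hxmem : x ∈ '#' :: u := List.mem_of_getElem? hxeq
      have hxd : x = '.' := by
        rcases halpha x hxmem with h' | h'
        · exact h'
        · exact absurd (h' ▸ hxeq) hget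
      have htk : ('#' :: u).take (n + 1) = List.replicate n '#' ++ ['.'] := by
        rw [List.take_succ, htake, hxeq, hxd]
        rfl
      refine ⟨htk, ?_⟩
      have := descL_take_decomp hn htk
      rw [h] at this
      exact ((List.cons_eq_cons.mp this).2).symm
  · rintro ⟨htk, hds⟩
    rw [descL_take_decomp hn htk, hds]

theorem specF_validate (r : List Char) (d : List Int) (p : List Char)
    (h2 : '?' ∉ r ∨ ((r.count '#' : Int) + (r.count '?' : Int)) = d.sum) :
    specF r d p =
      if descL (r.map (fun c => if c = '?' then '#' else c)) = d
      then [p ++ r.map (fun c => if c = '?' then '#' else c)] else [] := by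
  rcases h2 with hq | hsum
  · rw [specF, completions_no_q hq, map_qh_no_q hq]
    by_cases hif : descL r = d <;> simp [List.filterMap_cons, hif]
  · rw [specF, filterMap_single _ _ (r.map (fun c => if c = '?' then '#' else c))
      (completions_nodup r) (qh_mem r) ?_]
    · split <;> simp
    · intro s hs hne
      have hdesc : descL s = d := by
        by_contra hne'
        exact hne (if_neg hne')
      apply mem_completions_count_eq hs
      have h1 : ((descL s).sum : Int) = (s.count '#' : Int) := descL_sum s
      rw [hdesc, ← hsum] at h1
      exact_mod_cast h1.symm

theorem slice_one (xs : List Char) (n : Nat) :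
    PySem.List.slice xs (some ((n : Nat) : Int)) (some (((n : Nat) : Int) + 1)) = (xs.drop n).take 1 := by
  simpa using PySem.List.slice_natCast_add xs n 1

theorem genA_eq_specF : ∀ (r : List Char) (d : List Int) (p : List Char),
    ((∀ c ∈ r, c = '.' ∨ c = '#' ∨ c = '?') ∧ (∀ n ∈ d, 1 ≤ n)) ∨ d = [] ∨
      ((r.count '#' : Int) + (r.count '?' : Int)) < d.sum ∨ '?' ∉ r ∨
      ((r.count '#' : Int) + (r.count '?' : Int)) = d.sum →
    genA r d p = specF r d p := by
  intro r d p
  induction r, d, p using genA.induct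
  · -- desc = [], '#' ∈ record
    rename_i record prefix_ hmem
    intro _
    rw [genA, if_pos hmem, specF]
    symm
    apply filterMap_eq_nil
    intro s hs
    obtain ⟨j, hj⟩ := List.mem_iff_getElem?.mp hmem
    have hsj : s[j]? = some '#' := mem_completions_getElem? hs j '#' hj (by decide)
    exact if_neg (fun hdesc => ((descL_eq_nil_iff s).mp hdesc) (List.mem_of_getElem? hsj))
  · -- desc = [], '#' ∉ record
    rename_i record prefix_ hmem
    intro _
    rw [genA, if_neg hmem, specF,
      filterMap_single _ _ (record.map (fun c => if c = '?' then '.' else c))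
        (completions_nodup record) (qd_mem record) ?_]
    · rw [if_pos ((descL_eq_nil_iff _).mpr (qd_no_hash hmem))]
      rfl
    · intro s hs hne
      have hdesc : descL s = [] := by
        by_contra hne'
        exact hne (if_neg hne')
      exact mem_completions_no_hash hs hmem ((descL_eq_nil_iff s).mp hdesc)
  · -- prune
    rename_i record prefix_ run desc' mh hlt
    intro _
    rw [genA, if_pos hlt, specF]
    symm
    apply filterMap_eq_nil
    intro s hs
    apply if_neg
    intro hdesc
    have h1 := descL_sum s
    rw [hdesc] at h1
    have h2 := mem_completions_count hs
    omega
  · -- validate, describe matches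
    rename_i record prefix_ run desc' mh hsum hor rec2 hmatch
    intro _
    rw [genA, if_neg hsum, if_pos hor, specF_validate record (run :: desc') prefix_ hor]
  · -- validate, describe does not match
    rename_i record prefix_ run desc' mh hsum hor rec2 hmatch
    intro _
    rw [genA, if_neg hsum, if_pos hor, specF_validate record (run :: desc') prefix_ hor]
  · -- record1 = [] (unreachable: record would be all dots, but it contains a '?')
    rename_i record prefix_ run desc' mh hsum hbr rec1 hnil
    intro hH
    have hrd : (∀ c ∈ record, c = '.' ∨ c = '#' ∨ c = '?') ∧ (∀ n ∈ run :: desc', 1 ≤ n) := by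
      rcases hH with h | h | h | h | h
      · exact h
      · exact absurd h (by simp)
      · exact absurd h hsum
      · exact absurd (Or.inl h) hbr
      · exact absurd (Or.inr h) hbr
    obtain ⟨hr, hd⟩ := hrd
    exfalso
    have hq' : '?' ∈ record := by
      by_contra h
      exact hbr (Or.inl h)
    have hnil' : record.dropWhile (· = '.') = [] := by
      rw [← stripDots_fst record prefix_]; exact hnil
    have := List.dropWhile_eq_nil_iff.mp hnil' '?' hq'
    simp at this
  · -- '.' in record[:run]
    rename_i record prefix_ run desc' mh hsum hbr rec1 rest hdot hm
    intro hH
    have hrd : (∀ c ∈ record, c = '.' ∨ c = '#' ∨ c = '?') ∧ (∀ n ∈ run :: desc', 1 ≤ n) := by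
      rcases hH with h | h | h | h | h
      · exact h
      · exact absurd h (by simp)
      · exact absurd h hsum
      · exact absurd (Or.inl h) hbr
      · exact absurd (Or.inr h) hbr
    obtain ⟨hr, hd⟩ := hrd
    have hrun : (1 : Int) ≤ run := hd run List.mem_cons_self
    have hcast : ((run.toNat : Nat) : Int) = run := Int.toNat_of_nonneg (by omega)
    have hm' : (stripDots record prefix_).1 = '#' :: rest := hm
    have hdot' : '.' ∈ ('#' :: rest).take run.toNat := by
      have h0 : '.' ∈ PySem.List.slice ('#' :: rest) none (some run) := by rw [← hm']; exact hdot
      rwa [PySem.List.slice_to _ (show (0:Int) ≤ run by omega)] at h0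
    rw [genA, if_neg hsum, if_neg hbr, hm']
    dsimp only
    rw [dif_pos rfl, if_pos (show '.' ∈ PySem.List.slice ('#' :: rest) none (some run) by
      rw [← hm']; exact hdot), specF_strip, hm', specF]
    symm
    apply filterMap_eq_nil
    intro s hs
    apply if_neg
    intro hdesc
    rw [← hcast] at hdesc
    obtain ⟨j, hjn, hjget⟩ := mem_take_getElem? hdot'
    have hsj : s[j]? = some '.' := mem_completions_getElem? hs j '.' hjget (by decide)
    cases s with
    | nil => simp at hsj
    | cons c0 u =>
      have hc0 : c0 = '#' := by
        have := mem_completions_getElem? hs 0 '#' (by simp) (by decide)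
        simpa using this
      subst hc0
      obtain ⟨htake, -, -⟩ := descL_run_facts u run.toNat desc' hdesc
      have hsj2 : ('#' :: u)[j]? = some '#' := by
        have h1 : (('#' :: u).take run.toNat)[j]? = ('#' :: u)[j]? := by
          rw [List.getElem?_take]; rw [if_pos hjn]
        rw [← h1, htake, List.getElem?_replicate, if_pos hjn]
      rw [hsj2] at hsj
      simp at hsj
  · -- next_char = "#"
    rename_i record prefix_ run desc' mh hsum hbr rec1 rest hdotn nc hnext hm
    intro hH
    have hrd : (∀ c ∈ record, c = '.' ∨ c = '#' ∨ c = '?') ∧ (∀ n ∈ run :: desc', 1 ≤ n) := by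
      rcases hH with h | h | h | h | h
      · exact h
      · exact absurd h (by simp)
      · exact absurd h hsum
      · exact absurd (Or.inl h) hbr
      · exact absurd (Or.inr h) hbr
    obtain ⟨hr, hd⟩ := hrd
    have hrun : (1 : Int) ≤ run := hd run List.mem_cons_self
    have hcast : ((run.toNat : Nat) : Int) = run := Int.toNat_of_nonneg (by omega)
    have hm' : (stripDots record prefix_).1 = '#' :: rest := hm
    have hnext' : PySem.List.slice ('#' :: rest) (some run) (some (run + 1)) = ['#'] := by
      rw [← hm']; exact hnext
    have hnn : ('#' :: rest)[run.toNat]? = some '#' := by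
      have hsl := slice_one ('#' :: rest) run.toNat
      rw [hcast, drop_take_one] at hsl
      rw [hsl] at hnext'
      cases h : ('#' :: rest)[run.toNat]? with
      | none => rw [h] at hnext'; simp at hnext'
      | some y => rw [h] at hnext'; simp at hnext'; rw [hnext']
    rw [genA, if_neg hsum, if_neg hbr, hm']
    dsimp only
    rw [dif_pos rfl, if_neg (show '.' ∉ PySem.List.slice ('#' :: rest) none (some run) by
        rw [← hm']; exact hdotn),
      if_pos (show PySem.List.slice ('#' :: rest) (some run) (some (run + 1)) = ['#'] by
        rw [← hm']; exact hnext),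
      specF_strip, hm', specF]
    symm
    apply filterMap_eq_nil
    intro s hs
    apply if_neg
    intro hdesc
    rw [← hcast] at hdesc
    have hsn : s[run.toNat]? = some '#' := mem_completions_getElem? hs run.toNat '#' hnn (by decide)
    cases s with
    | nil => simp at hsn
    | cons c0 u =>
      have hc0 : c0 = '#' := by
        have := mem_completions_getElem? hs 0 '#' (by simp) (by decide)
        simpa using this
      subst hc0
      obtain ⟨-, hget, -⟩ := descL_run_facts u run.toNat desc' hdesc
      exact hget hsn
  · -- '#' branch, recursive call
    rename_i record prefix_ run desc' mh hsum hbr rec1 pre1 rest hdotn consumed nc hnne cons2 hm ih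
    intro hH
    have hrd : (∀ c ∈ record, c = '.' ∨ c = '#' ∨ c = '?') ∧ (∀ n ∈ run :: desc', 1 ≤ n) := by
      rcases hH with h | h | h | h | h
      · exact h
      · exact absurd h (by simp)
      · exact absurd h hsum
      · exact absurd (Or.inl h) hbr
      · exact absurd (Or.inr h) hbr
    obtain ⟨hr, hd⟩ := hrd
    have hrun : (1 : Int) ≤ run := hd run List.mem_cons_self
    have hn1 : 1 ≤ run.toNat := by omega
    have hcast : ((run.toNat : Nat) : Int) = run := Int.toNat_of_nonneg (by omega)
    have hm' : (stripDots record prefix_).1 = '#' :: rest := hm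
    have hd' : ∀ n ∈ desc', 1 ≤ n := fun n hn => hd n (List.mem_cons_of_mem _ hn)
    have halpha1 : ∀ c ∈ '#' :: rest, c = '.' ∨ c = '#' ∨ c = '?' := by
      intro c hc
      apply hr
      have : c ∈ (stripDots record prefix_).1 := by rw [hm']; exact hc
      rw [stripDots_fst] at this
      exact (List.dropWhile_sublist _).subset this
    have hdotn' : '.' ∉ ('#' :: rest).take run.toNat := by
      have h0 : '.' ∉ PySem.List.slice ('#' :: rest) none (some run) := by rw [← hm']; exact hdotn
      rwa [PySem.List.slice_to _ (show (0:Int) ≤ run by omega)] at h0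
    have hsl : PySem.List.slice ('#' :: rest) (some run) (some (run + 1)) =
        (('#' :: rest).drop run.toNat).take 1 := by
      have h0 := slice_one ('#' :: rest) run.toNat
      rwa [hcast] at h0
    cases hx : ('#' :: rest)[run.toNat]? with
    | none =>
      -- unreachable: all remaining characters could be '#', but then maybe_hashes ≤ sum desc
      exfalso
      have hlen : ('#' :: rest).length ≤ run.toNat := List.getElem?_eq_none_iff.mp hx
      have htk : ('#' :: rest).take run.toNat = '#' :: rest := List.take_of_length_le hlen
      have hhq : ∀ c ∈ '#' :: rest, c = '#' ∨ c = '?' := by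
        intro c hc
        rcases halpha1 c hc with rfl | h | h
        · exact absurd (by rw [htk]; exact hc) hdotn'
        · exact Or.inl h
        · exact Or.inr h
      have hcnt := count_hash_q_eq_length _ hhq
      have hc1 : record.count '#' = ('#' :: rest).count '#' := by
        rw [← hm', stripDots_fst, count_dropWhile_dot record '#' (by decide)]
      have hc2 : record.count '?' = ('#' :: rest).count '?' := by
        rw [← hm', stripDots_fst, count_dropWhile_dot record '?' (by decide)]
      have hne : ((record.count '#' : Int) + (record.count '?' : Int)) ≠ (run :: desc').sum :=
        fun h => hbr (Or.inr h)
      have hpos : 0 ≤ desc'.sum := pos_sum_nonneg hd'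
      simp only [List.sum_cons] at hsum hne
      omega
    | some x =>
      obtain ⟨hlt, hxval⟩ := List.getElem?_eq_some_iff.mp hx
      have hxne : x ≠ '#' := by
        intro hxh
        apply hnne
        show PySem.List.slice ((stripDots record prefix_).1) (some run) (some (run + 1)) = ['#']
        rw [hm', hsl, List.drop_eq_getElem_cons hlt, hxval, hxh]
        rfl
      have hxmem : x ∈ '#' :: rest := List.mem_of_getElem? hx
      have hnlit : PySem.List.slice ('#' :: rest) (some run) (some (run + 1)) = [x] := by
        rw [hsl, List.drop_eq_getElem_cons hlt, hxval]
        rfl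
      -- the pattern that must be consumed
      set pat : List Char := List.replicate run.toNat '#' ++ ['.'] with hpatdef
      have hplen : pat.length = run.toNat + 1 := by simp [hpatdef]
      -- rewrite the induction hypothesis into explicit form
      have hc2v : cons2 = pat := by
        show (if _ : nc ≠ [] then consumed ++ ['.'] else consumed) = pat
        have hncv : nc = [x] := by
          show PySem.List.slice ((stripDots record prefix_).1) (some run) (some (run + 1)) = [x]
          rw [hm', hnlit]
        rw [hncv]
        simp [hpatdef]
        rfl
      have ih' : genA (('#' :: rest).drop (run.toNat + 1)) desc'
            ((stripDots record prefix_).2 ++ pat)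
          = specF (('#' :: rest).drop (run.toNat + 1)) desc'
            ((stripDots record prefix_).2 ++ pat) := by
        have h9 : List.drop cons2.length rec1 = ('#' :: rest).drop (run.toNat + 1) := by
          rw [hc2v, show rec1 = '#' :: rest from hm, hplen]
        have h10 : pre1 ++ cons2 = (stripDots record prefix_).2 ++ pat := by
          rw [hc2v]
        rw [h9, h10] at ih
        exact ih (Or.inl ⟨fun c hc => halpha1 c ((List.drop_sublist _ _).subset hc), hd'⟩)
      -- A side
      rw [genA, if_neg hsum, if_neg hbr, hm']
      dsimp only
      rw [dif_pos rfl, if_neg (show '.' ∉ PySem.List.slice ('#' :: rest) none (some run) by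
          rw [← hm']; exact hdotn), hnlit,
        if_neg (by simp [hxne]), if_pos (by simp),
        show (List.replicate run.toNat '#' ++ ['.']).length = run.toNat + 1 by simp]
      rw [ih']
      -- B side
      conv_rhs => rw [specF_strip record (run :: desc') prefix_, hm']
      -- convert the filter condition and split off the consumed pattern
      have hstep : specF ('#' :: rest) (run :: desc') ((stripDots record prefix_).2)
          = specF (('#' :: rest).drop (run.toNat + 1)) desc'
              ((stripDots record prefix_).2 ++ pat) := by
        have hcompat : ∀ (i : Nat) (c cp : Char), ('#' :: rest)[i]? = some c →
            pat[i]? = some cp → c ≠ '?' → c = cp := by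
          intro i c cp hic hip hcq
          rcases Nat.lt_trichotomy i run.toNat with hin | rfl | hgt
          · have hcp : cp = '#' := by
              rw [List.getElem?_append_left (by simpa using hin), List.getElem?_replicate,
                if_pos hin] at hip
              exact (Option.some_inj.mp hip).symm
            have hcmem : c ∈ ('#' :: rest).take run.toNat := by
              apply List.mem_of_getElem? (i := i)
              rw [List.getElem?_take, if_pos hin]
              exact hic
            have hcd : c ≠ '.' := fun hcd => hdotn' (by rw [← hcd]; exact hcmem)
            rcases halpha1 c (List.mem_of_getElem? hic) with h | h | h
            · exact absurd h hcd
            · rw [h, hcp]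
            · exact absurd h hcq
          · have hcp : cp = '.' := by
              rw [List.getElem?_append_right (by simp)] at hip
              simp at hip
              exact hip.symm
            have hcx : c = x := by
              rw [hic] at hx
              exact Option.some_inj.mp hx
            rcases halpha1 c (List.mem_of_getElem? hic) with h | h | h
            · rw [h, hcp]
            · exact absurd (hcx ▸ h ▸ rfl : x = '#') hxne
            · exact absurd h hcq
          · rw [List.getElem?_eq_none_iff.mpr (by rw [hplen]; omega)] at hip
            exact absurd hip (by simp)
        have hpat : ∀ c ∈ pat, c = '.' ∨ c = '#' := by
          intro c hc
          rcases List.mem_append.mp hc with h | h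
          · exact Or.inr (List.eq_of_mem_replicate h)
          · simp at h; exact Or.inl h
        have hlen2 : pat.length ≤ ('#' :: rest).length := by rw [hplen]; omega
        have hcongr : ∀ s ∈ completions ('#' :: rest),
            (if descL s = run :: desc' then some ((stripDots record prefix_).2 ++ s) else none)
            = (if s.take pat.length = pat ∧ descL (s.drop pat.length) = desc'
               then some ((stripDots record prefix_).2 ++ s) else none) := by
          intro s hs
          have hslen : s.length = ('#' :: rest).length := mem_completions_length hs
          have hs0 : s[0]? = some '#' := mem_completions_getElem? hs 0 '#' (by simp) (by decide)
          have hiff := descL_match_iff s run.toNat hn1 (by rw [hslen]; exact hlt) hs0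
            (mem_completions_alpha hs halpha1) desc'
          rw [← hplen] at hiff
          rw [if_congr (Iff.trans (by rw [hcast]) hiff) rfl rfl]
        rw [specF, filterMap_congr_mem hcongr,
          completions_split pat (fun u => descL u = desc') ('#' :: rest)
            ((stripDots record prefix_).2) hlen2 hcompat hpat, hplen, specF]
      rw [hstep]
  · -- '?' branch
    rename_i record prefix_ run desc' mh hsum hbr rec1 pre1 rest hm hne9 ihA ihB
    intro hH
    have hrd : (∀ c ∈ record, c = '.' ∨ c = '#' ∨ c = '?') ∧ (∀ n ∈ run :: desc', 1 ≤ n) := by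
      rcases hH with h | h | h | h | h
      · exact h
      · exact absurd h (by simp)
      · exact absurd h hsum
      · exact absurd (Or.inl h) hbr
      · exact absurd (Or.inr h) hbr
    obtain ⟨hr, hd⟩ := hrd
    have hm' : (stripDots record prefix_).1 = '?' :: rest := hm
    have halpha1 : ∀ c ∈ '?' :: rest, c = '.' ∨ c = '#' ∨ c = '?' := by
      intro c hc
      apply hr
      have : c ∈ (stripDots record prefix_).1 := by rw [hm']; exact hc
      rw [stripDots_fst] at this
      exact (List.dropWhile_sublist _).subset this
    have ihA' : genA rest (run :: desc') ((stripDots record prefix_).2 ++ ['.'])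
        = specF rest (run :: desc') ((stripDots record prefix_).2 ++ ['.']) :=
      ihA (Or.inl ⟨fun c hc => halpha1 c (List.mem_cons_of_mem _ hc), hd⟩)
    have ihB' : genA ('#' :: rest) (run :: desc') ((stripDots record prefix_).2)
        = specF ('#' :: rest) (run :: desc') ((stripDots record prefix_).2) :=
      ihB (Or.inl ⟨fun c hc => by
        rcases List.mem_cons.mp hc with rfl | h
        · exact Or.inr (Or.inl rfl)
        · exact halpha1 c (List.mem_cons_of_mem _ h), hd⟩)
    rw [genA, if_neg hsum, if_neg hbr, hm']
    dsimp only
    rw [dif_neg (by decide), dif_pos rfl, ihA', ihB']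
    conv_rhs => rw [specF_strip record (run :: desc') prefix_, hm', specF_qmark]
  · -- invalid character (unreachable under Pre_)
    rename_i record prefix_ run desc' mh hsum hbr rec1 c rest hm hc hq
    intro hH
    have hrd : (∀ c ∈ record, c = '.' ∨ c = '#' ∨ c = '?') ∧ (∀ n ∈ run :: desc', 1 ≤ n) := by
      rcases hH with h | h | h | h | h
      · exact h
      · exact absurd h (by simp)
      · exact absurd h hsum
      · exact absurd (Or.inl h) hbr
      · exact absurd (Or.inr h) hbr
    obtain ⟨hr, hd⟩ := hrd
    exfalso
    have hm' : (stripDots record prefix_).1 = c :: rest := hm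
    have hcr : c ∈ record := by
      have : c ∈ (stripDots record prefix_).1 := by rw [hm']; exact List.mem_cons_self
      rw [stripDots_fst] at this
      exact (List.dropWhile_sublist _).subset this
    have hdot : c ≠ '.' := by
      intro hdot
      have hh : ((stripDots record prefix_).1).head? = some c := by rw [hm']; rfl
      rw [stripDots_fst] at hh
      have := dropWhile_head?_not _ _ _ hh
      simp [hdot] at this
    rcases hr c hcr with h | h | h
    · exact hdot h
    · exact hc h
    · exact hq h

-- ===== VERDICT (by name: the statement is the Claim_ definition above) =====
theorem gen_nonograms_spec : Claim_equal_gen_nonograms := by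
  intro record desc prefix_ _ hpre
  unfold Spec_gen_nonograms gen_nonograms gen_nonograms_alt
  rw [genA_eq_specF record.toList desc prefix_.toList ?_, pyFulls_eq]
  · rfl
  · rcases hpre with ⟨h1, h2⟩ | h | h | h | h
    · left
      simp only [List.all_eq_true, Bool.or_eq_true, beq_iff_eq] at h1
      exact ⟨fun c hc => (or_assoc).mp (h1 c hc), h2⟩
    · exact Or.inr (Or.inl h)
    · exact Or.inr (Or.inr (Or.inl h))
    · refine Or.inr (Or.inr (Or.inr (Or.inl ?_)))
      simpa using h
    · exact Or.inr (Or.inr (Or.inr (Or.inr h)))
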